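-- pv_equiv track=rewrite | github.com/dogoo3/AITheoryAndUsing | editpdf.py | grouping_data
-- ===== SOURCE A (Python) =====
-- def grouping_data(analysis_data):
--     # --- 그룹화 로직 시작 ---
--
--     # 1. 품사(POS) 태그를 그룹으로 매핑하는 딕셔너리를 정의합니다.
--     pos_to_group = {
--         'NN': '명사', 'NNS': '명사', 'NNP': '명사', 'NNPS': '명사', 'PRP': '명사', 'PRP$': '명사', 'WDT': '명사', 'WP': '명사',
--         'MD': '동사', 'VB': '동사', 'VBG': '동사', 'VBD': '동사', 'VBN': '동사', 'VBP': '동사', 'VBZ': '동사', 'TO': '동사',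
--         'JJ': '형용사', 'JJR': '형용사', 'JJS': '형용사',
--         'CC': '접속사',
--         'IN': '전치사', 'RP': '전치사',
--         'RB': '부사', 'RBR': '부사', 'RBS': '부사', 'WRB': '부사',
--         'DT': '한정사', 'PDT': '한정사',
--         'CD': '기타', 'EX': '기타', 'FW': '기타', 'LS': '기타', 'POS': '기타', 'UH': '기타'
--     }
--
--     # 2. 분석된 데이터를 순회하며 동일 그룹의 인접 단어를 병합합니다.
--     grouped_analysis_data = []
--     i = 0
--     while i < len(analysis_data):
--         # 현재 단어와 태그를 가져옵니다.
--         current_item = analysis_data[i]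
--         current_word = list(current_item.keys())[0]
--         current_tag = list(current_item.values())[0]
--
--         # 현재 태그가 그룹에 속하는지 확인합니다.
--         current_group = pos_to_group.get(current_tag)
--
--         # 그룹에 속하고, 다음 단어가 있다면 그룹화를 시도합니다.
--         if current_group:
--             j = i + 1
--             # 다음 단어가 같은 그룹에 속하는 동안 반복합니다.
--             while j < len(analysis_data):
--                 next_item = analysis_data[j]
--                 next_word = list(next_item.keys())[0]
--                 next_tag = list(next_item.values())[0]
--                 next_group = pos_to_group.get(next_tag)
--
--                 if next_group == current_group:
--                     # 같은 그룹이면 단어를 합치고 다음 단어로 넘어갑니다.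
--                     current_word += " " + next_word
--                     j += 1
--                 else:
--                     # 다른 그룹이면 중단합니다.
--                     break
--
--             # 그룹화된 결과를 새로운 리스트에 추가합니다.
--             grouped_analysis_data.append({current_word: current_tag})
--             # 인덱스를 병합된 단어의 수만큼 점프시킵니다.
--             i = j
--         else:
--             # 그룹에 속하지 않는 단어(예: 구두점)는 그대로 추가합니다.
--             grouped_analysis_data.append(current_item)
--             i += 1
--
--     # --- 그룹화 로직 종료 ---
--
--     return grouped_analysis_data
-- ===== SOURCE B (Python) =====
-- _POS_TO_GROUP = {
--     'NN': '명사', 'NNS': '명사', 'NNP': '명사', 'NNPS': '명사', 'PRP': '명사', 'PRP$': '명사', 'WDT': '명사', 'WP': '명사',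
--     'MD': '동사', 'VB': '동사', 'VBG': '동사', 'VBD': '동사', 'VBN': '동사', 'VBP': '동사', 'VBZ': '동사', 'TO': '동사',
--     'JJ': '형용사', 'JJR': '형용사', 'JJS': '형용사',
--     'CC': '접속사',
--     'IN': '전치사', 'RP': '전치사',
--     'RB': '부사', 'RBR': '부사', 'RBS': '부사', 'WRB': '부사',
--     'DT': '한정사', 'PDT': '한정사',
--     'CD': '기타', 'EX': '기타', 'FW': '기타', 'LS': '기타', 'POS': '기타', 'UH': '기타'
-- }
--
--
-- def grouping_data(analysis_data):
--     # Single forward pass keeping the currently-open run of same-group words;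
--     # the run is flushed when the group changes or an ungrouped item appears.
--     result = []
--     open_group = None   # group of the currently open run (None = no open run)
--     open_words = None   # words of the open run, space-joined so far
--     open_tag = None     # POS tag of the first item of the open run
--     for item in analysis_data:
--         word = list(item.keys())[0]
--         tag = list(item.values())[0]
--         group = _POS_TO_GROUP.get(tag)
--         if group and group == open_group:
--             open_words += " " + word
--         else:
--             if open_group:
--                 result.append({open_words: open_tag})
--                 open_group = None
--             if group:
--                 open_group, open_words, open_tag = group, word, tag
--             else:
--                 result.append(item)
--     if open_group:
--         result.append({open_words: open_tag})
--     return result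
-- ===== Notes on version B (the rewrite author's own statement) =====
-- stated objective: simpler
-- what changed: Replaces A's nested-while lookahead with index jumps by a single forward pass that maintains the currently-open same-group run in an accumulator and flushes it on group change, ungrouped item, or end of input.
import Mathlib
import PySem

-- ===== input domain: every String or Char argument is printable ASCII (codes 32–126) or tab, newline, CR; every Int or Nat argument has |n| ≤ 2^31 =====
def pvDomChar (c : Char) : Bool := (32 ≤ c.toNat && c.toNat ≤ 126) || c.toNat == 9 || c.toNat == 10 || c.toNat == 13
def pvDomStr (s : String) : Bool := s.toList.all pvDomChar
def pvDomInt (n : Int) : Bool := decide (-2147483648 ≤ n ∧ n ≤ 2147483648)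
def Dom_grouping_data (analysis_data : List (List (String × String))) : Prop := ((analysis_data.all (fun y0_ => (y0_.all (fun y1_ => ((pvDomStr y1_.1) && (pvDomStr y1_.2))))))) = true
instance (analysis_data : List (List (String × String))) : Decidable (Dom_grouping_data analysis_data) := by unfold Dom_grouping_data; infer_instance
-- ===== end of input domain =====

set_option maxRecDepth 16384

-- B replaces A's nested-while lookahead (with index jumps) by a single forward accumulator
-- pass that keeps the currently-open same-group run and flushes it on group change,
-- ungrouped item, or end of input (objective: simpler).

-- ===== PORT A =====

-- the pos_to_group dict literal (shared constant of both Pythons)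
def posToGroup : PySem.Dict String String := PySem.Dict.ofList [("NN", "명사"),
  ("NNS", "명사"), ("NNP", "명사"), ("NNPS", "명사"), ("PRP", "명사"), ("PRP$", "명사"),
  ("WDT", "명사"), ("WP", "명사"), ("MD", "동사"), ("VB", "동사"), ("VBG", "동사"),
  ("VBD", "동사"), ("VBN", "동사"), ("VBP", "동사"), ("VBZ", "동사"), ("TO", "동사"),
  ("JJ", "형용사"), ("JJR", "형용사"), ("JJS", "형용사"), ("CC", "접속사"),
  ("IN", "전치사"), ("RP", "전치사"), ("RB", "부사"), ("RBR", "부사"), ("RBS", "부사"),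
  ("WRB", "부사"), ("DT", "한정사"), ("PDT", "한정사"), ("CD", "기타"), ("EX", "기타"),
  ("FW", "기타"), ("LS", "기타"), ("POS", "기타"), ("UH", "기타")]

-- list(item.keys())[0] / list(item.values())[0]; total form pyGetD is exact under
-- Pre_grouping_data (every item dict is nonempty, so index 0 is in range)
def pvFirstKey (item : List (String × String)) : String :=
  PySem.List.pyGetD (item.map Prod.fst) 0 ""
def pvFirstVal (item : List (String × String)) : String :=
  PySem.List.pyGetD (item.map Prod.snd) 0 ""

-- A's inner while loop: merge following words while next_group == current_group;
-- returns (current_word after merging, remaining suffix starting at index j)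
def gdMerge (g : String) (w : String) :
    List (List (String × String)) → String × List (List (String × String))
  | [] => (w, [])
  | item :: rest =>
    if posToGroup.get? (pvFirstVal item) = some g then
      gdMerge g (w ++ " " ++ pvFirstKey item) rest
    else (w, item :: rest)

theorem gdMerge_length_le (g w : String) (l : List (List (String × String))) :
    (gdMerge g w l).2.length ≤ l.length := by
  induction l generalizing w with
  | nil => simp [gdMerge]
  | cons item rest ih =>
    simp only [gdMerge]
    split
    · exact le_trans (ih _) (by simp)
    · simp

-- A's outer while loop (the Python truthiness test 'if current_group:' is exactly
-- isSome here: every group name in pos_to_group is a nonempty, hence truthy, string)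
def grouping_data (analysis_data : List (List (String × String))) :
    List (List (String × String)) :=
  match analysis_data with
  | [] => []
  | item :: rest =>
    let current_word := pvFirstKey item
    let current_tag := pvFirstVal item
    match posToGroup.get? current_tag with
    | some g =>
      let p := gdMerge g current_word rest
      [(p.1, current_tag)] :: grouping_data p.2
    | none => item :: grouping_data rest
termination_by analysis_data.length
decreasing_by
  · exact Nat.lt_succ_of_le (gdMerge_length_le _ _ _)
  · simp

-- ===== PORT B =====

-- B's loop body: state = (result so far, currently-open run as Option (group, words, tag));
-- the Python truthiness tests on 'group' / 'open_group' are the Option matches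
def gdStep (st : List (List (String × String)) × Option (String × String × String))
    (item : List (String × String)) :
    List (List (String × String)) × Option (String × String × String) :=
  let word := pvFirstKey item
  let tag := pvFirstVal item
  match posToGroup.get? tag, st.2 with
  | some g, some (og, ow, ot) =>
    if g = og then (st.1, some (og, ow ++ " " ++ word, ot))
    else (st.1 ++ [[(ow, ot)]], some (g, word, tag))
  | some g, none => (st.1, some (g, word, tag))
  | none, some (_og, ow, ot) => (st.1 ++ [[(ow, ot)], item], none)
  | none, none => (st.1 ++ [item], none)

-- B's final flush ('if open_group: result.append(...)')
def gdFlush (st : List (List (String × String)) × Option (String × String × String)) :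
    List (List (String × String)) :=
  match st.2 with
  | some (_, ow, ot) => st.1 ++ [[(ow, ot)]]
  | none => st.1

def grouping_data_alt (analysis_data : List (List (String × String))) :
    List (List (String × String)) :=
  gdFlush (analysis_data.foldl gdStep ([], none))

-- ===== PRECONDITION & SPEC =====
-- Pre_ excludes inputs containing an empty dict: there list(item.keys())[0] raises
-- IndexError in A (and in B alike), so A returns no value.
def Pre_grouping_data (analysis_data : List (List (String × String))) : Prop :=
  ∀ item ∈ analysis_data, item ≠ []
instance (analysis_data : List (List (String × String))) : Decidable (Pre_grouping_data analysis_data) := by unfold Pre_grouping_data; infer_instance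

def pvWitness_grouping_data : (List (List (String × String))) :=
  [[("dog", "NN")], [("runs", "VBZ")], [(".", ".")]]

def Spec_grouping_data (analysis_data : List (List (String × String))) (out : List (List (String × String))) : Prop := out = grouping_data_alt analysis_data
instance (analysis_data : List (List (String × String))) (out : List (List (String × String))) : Decidable (Spec_grouping_data analysis_data out) := by unfold Spec_grouping_data; infer_instance

-- ===== CLAIM (what is proved, stated in full; the proofs are below) =====
def Claim_equal_grouping_data : Prop := ∀ (analysis_data : List (List (String × String))), Dom_grouping_data analysis_data → Pre_grouping_data analysis_data → Spec_grouping_data analysis_data (grouping_data analysis_data)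

-- ===== LEMMAS AND PROOFS =====

-- Core invariant, both loop states at once: flushing B's fold from a closed state
-- produces A's output of the remaining list; from an open run (g, ow, ot) it produces
-- the merged run (A's inner loop applied to the rest) followed by A's output of what
-- that inner loop leaves.
theorem gd_fold_invariant (l : List (List (String × String))) :
    (∀ res, gdFlush (l.foldl gdStep (res, none)) = res ++ grouping_data l) ∧
    (∀ (g ow ot : String) res,
      gdFlush (l.foldl gdStep (res, some (g, ow, ot)))
        = res ++ [[((gdMerge g ow l).1, ot)]] ++ grouping_data (gdMerge g ow l).2) := by
  induction l with
  | nil =>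
    constructor
    · intro res; simp [gdFlush, grouping_data]
    · intro g ow ot res; simp [gdFlush, gdMerge, grouping_data]
  | cons item rest ih =>
    obtain ⟨ihC, ihO⟩ := ih
    constructor
    · intro res
      rw [List.foldl_cons]
      cases h : posToGroup.get? (pvFirstVal item) with
      | some g =>
        have hs : gdStep (res, none) item = (res, some (g, pvFirstKey item, pvFirstVal item)) := by
          simp [gdStep, h]
        rw [hs, ihO]
        conv_rhs => rw [grouping_data.eq_def]
        simp [h]
      | none =>
        have hs : gdStep (res, none) item = (res ++ [item], none) := by
          simp [gdStep, h]
        rw [hs, ihC]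
        conv_rhs => rw [grouping_data.eq_def]
        simp [h]
    · intro g ow ot res
      rw [List.foldl_cons]
      cases h : posToGroup.get? (pvFirstVal item) with
      | some g' =>
        by_cases hg : g' = g
        · subst hg
          have hs : gdStep (res, some (g', ow, ot)) item
              = (res, some (g', ow ++ " " ++ pvFirstKey item, ot)) := by
            simp [gdStep, h]
          rw [hs, ihO]
          have hm : gdMerge g' ow (item :: rest)
              = gdMerge g' (ow ++ " " ++ pvFirstKey item) rest := by
            simp [gdMerge, h]
          rw [hm]
        · have hs : gdStep (res, some (g, ow, ot)) item
              = (res ++ [[(ow, ot)]], some (g', pvFirstKey item, pvFirstVal item)) := by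
            simp [gdStep, h, hg]
          rw [hs, ihO]
          have hm : gdMerge g ow (item :: rest) = (ow, item :: rest) := by
            simp [gdMerge, h, hg]
          rw [hm]
          conv_rhs => rw [grouping_data.eq_def]
          simp [h]
      | none =>
        have hs : gdStep (res, some (g, ow, ot)) item
            = (res ++ [[(ow, ot)], item], none) := by
          simp [gdStep, h]
        rw [hs, ihC]
        have hm : gdMerge g ow (item :: rest) = (ow, item :: rest) := by
          simp [gdMerge, h]
        rw [hm]
        simp only []
        conv_rhs => rw [grouping_data.eq_def]
        simp [h]

-- ===== VERDICT (by name: the statement is the Claim_ definition above) =====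
theorem grouping_data_spec : Claim_equal_grouping_data := by
  intro l _ _
  unfold Spec_grouping_data grouping_data_alt
  have h := (gd_fold_invariant l).1 []
  simp only [List.nil_append] at h
  exact h.symm
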